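-- pv_equiv track=rewrite | github.com/danoscarmike/adventofcode | 2024/day6.py | trap_patrol
-- ===== SOURCE A (Python) =====
-- def is_valid(grid, row, col) -> bool:
--     return 0 <= row < len(grid) and 0 <= col < len(grid[row])
--
-- def check_for_cycle(grid, row, col) -> bool:
--     dr, dc = -1, 0
--     visited = set()
--
--     while True:
--
--         if (row, col, dr, dc) in visited:
--             return True
--
--         visited.add((row, col, dr, dc))
--
--         if not is_valid(grid, row + dr, col + dc):
--             return False
--
--         if grid[row + dr][col + dc] == "#":
--             dr, dc = dc, -dr
--         else:
--             row += dr
--             col += dc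
--
-- def trap_patrol(grid, row, col) -> int:
--     start_row, start_col = row, col
--     cycles = 0
--
--     for row in range(len(grid)):
--         for col in range(len(grid[0])):
--             if grid[row][col] != ".":
--                 continue
--             grid[row][col] = "#"
--             if check_for_cycle(grid, start_row, start_col):
--                 cycles += 1
--             grid[row][col] = "."
--
--     return cycles
-- ===== SOURCE B (Python) =====
-- def trap_patrol(grid, row, col) -> int:
--     def valid(r, c):
--         return 0 <= r < len(grid) and 0 <= c < len(grid[r])
--
--     def walk(obstacle):
--         # simulate the guard once; returns (cycled, positions of all visited states)
--         r, c, dr, dc = row, col, -1, 0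
--         seen = set()
--         while (r, c, dr, dc) not in seen:
--             seen.add((r, c, dr, dc))
--             nr, nc = r + dr, c + dc
--             if not valid(nr, nc):
--                 return False, {(sr, sc) for sr, sc, _, _ in seen}
--             front = "#" if (nr, nc) == obstacle else grid[nr][nc]
--             if front == "#":
--                 dr, dc = dc, -dr
--             else:
--                 r, c = nr, nc
--         return True, {(sr, sc) for sr, sc, _, _ in seen}
--
--     cycled, path = walk(None)
--     total = 0
--     if cycled:
--         # every off-path "." cell leaves the (cyclic) walk unchanged and counts
--         for r in range(len(grid)):
--             for c in range(len(grid[0])):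
--                 if grid[r][c] != ".":
--                     continue
--                 if (r, c) in path:
--                     if walk((r, c))[0]:
--                         total += 1
--                 else:
--                     total += 1
--     else:
--         # the walk exits: only obstacles on its path can change it
--         for r, c in path:
--             if 0 <= r < len(grid) and 0 <= c < len(grid[0]) and grid[r][c] == ".":
--                 if walk((r, c))[0]:
--                     total += 1
--     return total
-- ===== Notes on version B (the rewrite author's own statement) =====
-- stated objective: faster
-- what changed: B simulates the guard's unobstructed patrol once and records its path; if that walk exits the grid it tests obstacles only at the path's own '.' cells (skipping the whole-grid scan entirely), and if it cycles it reuses that cached answer for every off-path '.' cell, running full cycle checks only for on-path cells; obstacles are passed as a parameter instead of mutating the grid.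
import Mathlib
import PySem

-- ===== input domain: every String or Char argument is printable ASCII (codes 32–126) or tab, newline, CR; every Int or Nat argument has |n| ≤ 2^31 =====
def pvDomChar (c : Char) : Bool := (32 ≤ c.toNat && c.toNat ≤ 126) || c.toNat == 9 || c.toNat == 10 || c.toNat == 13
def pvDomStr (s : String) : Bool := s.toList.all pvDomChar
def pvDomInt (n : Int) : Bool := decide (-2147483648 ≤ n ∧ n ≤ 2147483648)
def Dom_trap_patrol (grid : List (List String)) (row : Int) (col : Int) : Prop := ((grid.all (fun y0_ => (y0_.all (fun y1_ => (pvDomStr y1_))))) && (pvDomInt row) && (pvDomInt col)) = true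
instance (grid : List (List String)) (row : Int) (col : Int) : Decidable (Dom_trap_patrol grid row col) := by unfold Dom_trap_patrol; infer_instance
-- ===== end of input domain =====

-- B re-implements A by simulating the guard once and testing only obstacle cells on that
-- original path (off-path obstacles cannot change the walk); return-value equivalence only:
-- A mutates `grid` transiently but restores it, B never mutates.

-- ===== PORT A =====
-- grid[r][c] as a total read (used only where Python's index is in range)
def pvCell (g : List (List String)) (r c : Int) : String :=
  PySem.List.pyGetD (PySem.List.pyGetD g r []) c ""

-- is_valid(grid, row, col)
def pvValid (g : List (List String)) (r c : Int) : Bool :=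
  decide (0 ≤ r) && decide (r < (g.length : Int)) && decide (0 ≤ c) &&
    decide (c < ((PySem.List.pyGetD g r []).length : Int))

-- fuel for the `while True` loop: an upper bound on its iteration count
-- (each iteration adds a fresh state (pos, dir) to `visited`)
def pvFuel (g : List (List String)) : Nat := 4 * ((g.map List.length).sum + 2) + 8

-- check_for_cycle's loop, transliterated with fuel
def pvCheckA (g : List (List String)) :
    Nat → Int → Int → Int → Int → PySem.Set (Int × Int × Int × Int) → Bool
  | 0, _, _, _, _, _ => false
  | fuel + 1, r, c, dr, dc, vis =>
    if PySem.Set.contains vis (r, c, dr, dc) then true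
    else
      let vis' := PySem.Set.add vis (r, c, dr, dc)
      if !(pvValid g (r + dr) (c + dc)) then false
      else if pvCell g (r + dr) (c + dc) = "#" then pvCheckA g fuel r c dc (-dr) vis'
      else pvCheckA g fuel (r + dr) (c + dc) dr dc vis'

-- grid with grid[r][c] = "#"
def pvSet (g : List (List String)) (r c : Int) : List (List String) :=
  PySem.List.pySetD g r (PySem.List.pySetD (PySem.List.pyGetD g r []) c "#")

def trap_patrol (grid : List (List String)) (row : Int) (col : Int) : Int :=
  (PySem.List.pyRange 0 (grid.length : Int) 1).foldl (fun cycles r =>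
    (PySem.List.pyRange 0 ((PySem.List.pyGetD grid 0 []).length : Int) 1).foldl (fun cycles c =>
      if pvCell grid r c ≠ "." then cycles
      else if pvCheckA (pvSet grid r c) (pvFuel grid) row col (-1) 0 PySem.Set.empty then
        cycles + 1
      else cycles) cycles) 0

-- ===== PORT B =====
-- positions of the visited states
def pvPos (vis : PySem.Set (Int × Int × Int × Int)) : PySem.Set (Int × Int) :=
  PySem.Set.ofList (vis.map (fun s => (s.1, s.2.1)))

-- walk(obstacle): one simulation; returns (cycled?, positions of all visited states)
def pvWalkB (g : List (List String)) (obst : Option (Int × Int)) :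
    Nat → Int → Int → Int → Int → PySem.Set (Int × Int × Int × Int) →
      Bool × PySem.Set (Int × Int)
  | 0, _, _, _, _, vis => (false, pvPos vis)
  | fuel + 1, r, c, dr, dc, vis =>
    if PySem.Set.contains vis (r, c, dr, dc) then (true, pvPos vis)
    else
      let vis' := PySem.Set.add vis (r, c, dr, dc)
      if !(pvValid g (r + dr) (c + dc)) then (false, pvPos vis')
      else
        let front := if obst = some (r + dr, c + dc) then "#" else pvCell g (r + dr) (c + dc)
        if front = "#" then pvWalkB g obst fuel r c dc (-dr) vis'
        else pvWalkB g obst fuel (r + dr) (c + dc) dr dc vis'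

def trap_patrol_alt (grid : List (List String)) (row : Int) (col : Int) : Int :=
  let res := pvWalkB grid none (pvFuel grid) row col (-1) 0 PySem.Set.empty
  if res.1 then
    -- the unobstructed walk cycles: every off-path "." cell keeps it cycling
    (PySem.List.pyRange 0 (grid.length : Int) 1).foldl (fun total r =>
      (PySem.List.pyRange 0 ((PySem.List.pyGetD grid 0 []).length : Int) 1).foldl (fun total c =>
        if pvCell grid r c ≠ "." then total
        else if PySem.Set.contains res.2 (r, c) then
          if (pvWalkB grid (some (r, c)) (pvFuel grid) row col (-1) 0 PySem.Set.empty).1 then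
            total + 1
          else total
        else total + 1) total) 0
  else
    -- the walk exits: only obstacles on its path can change it
    res.2.foldl (fun total p =>
      if 0 ≤ p.1 ∧ p.1 < (grid.length : Int) ∧ 0 ≤ p.2 ∧
          p.2 < ((PySem.List.pyGetD grid 0 []).length : Int) ∧ pvCell grid p.1 p.2 = "." then
        if (pvWalkB grid (some p) (pvFuel grid) row col (-1) 0 PySem.Set.empty).1 then
          total + 1
        else total
      else total) 0

-- ===== PRECONDITION & SPEC =====
-- Pre_ excludes exactly the inputs on which A raises IndexError: when row 0 exists and
-- is nonempty (so the inner loop runs), ragged grids with a row shorter than row 0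
-- (grid[row][col] in the loop).
def Pre_trap_patrol (grid : List (List String)) (row : Int) (col : Int) : Prop :=
  (PySem.List.pyGetD grid 0 []).length = 0 ∨
    ∀ rw ∈ grid, (PySem.List.pyGetD grid 0 []).length ≤ rw.length
instance (grid : List (List String)) (row : Int) (col : Int) : Decidable (Pre_trap_patrol grid row col) := by unfold Pre_trap_patrol; infer_instance

def pvWitness_trap_patrol : List (List String) × Int × Int :=
  ([[".", "."], [".", "#"]], 1, 0)

def Spec_trap_patrol (grid : List (List String)) (row : Int) (col : Int) (out : Int) : Prop := out = trap_patrol_alt grid row col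
instance (grid : List (List String)) (row : Int) (col : Int) (out : Int) : Decidable (Spec_trap_patrol grid row col out) := by unfold Spec_trap_patrol; infer_instance

-- ===== CLAIM (what is proved, stated in full; the proofs are below) =====
def Claim_equal_trap_patrol : Prop := ∀ (grid : List (List String)) (row : Int) (col : Int), Dom_trap_patrol grid row col → Pre_trap_patrol grid row col → Spec_trap_patrol grid row col (trap_patrol grid row col)

-- ===== LEMMAS AND PROOFS =====

theorem lengths_pvSet (g : List (List String)) (pr pc : Int)
    (hr0 : 0 ≤ pr) (hr : pr < (g.length : Int)) :
    (pvSet g pr pc).map List.length = g.map List.length := by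
  unfold pvSet
  rw [PySem.List.pySetD_of_nonneg _ _ hr0, List.map_set, PySem.List.length_pySetD]
  have hlt : pr.toNat < (g.map List.length).length := by simp; omega
  have : (PySem.List.pyGetD g pr []).length = (g.map List.length)[pr.toNat]'hlt := by
    rw [PySem.List.pyGetD_eq_getElem g [] hr0 hr]
    simp
  rw [this, List.set_getElem_self]

theorem pvValid_pvSet (g : List (List String)) (pr pc : Int)
    (hr0 : 0 ≤ pr) (hr : pr < (g.length : Int)) (r c : Int) :
    pvValid (pvSet g pr pc) r c = pvValid g r c := by
  have key : ∀ (x : Int), (PySem.List.pyGetD (pvSet g pr pc) x []).length = (PySem.List.pyGetD g x []).length := by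
    intro x
    have h1 := PySem.List.pyGetD_map List.length (pvSet g pr pc) x []
    have h2 := PySem.List.pyGetD_map List.length g x []
    simp only [List.length_nil] at h1 h2
    rw [← h1, ← h2, lengths_pvSet g pr pc hr0 hr]
  have hlen : ((pvSet g pr pc).length : Int) = (g.length : Int) := by
    unfold pvSet; rw [PySem.List.length_pySetD]
  unfold pvValid
  rw [key, hlen]

theorem pvCell_pvSet (g : List (List String)) (pr pc : Int)
    (hr0 : 0 ≤ pr) (hr : pr < (g.length : Int))
    (hc0 : 0 ≤ pc) (hc : pc < ((PySem.List.pyGetD g pr []).length : Int))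
    (r c : Int) (h0r : 0 ≤ r) (h0c : 0 ≤ c) :
    pvCell (pvSet g pr pc) r c = if pr = r ∧ pc = c then "#" else pvCell g r c := by
  have e1 : pr = ((pr.toNat : Nat) : Int) := by omega
  have e2 : pc = ((pc.toNat : Nat) : Int) := by omega
  have e3 : r = ((r.toNat : Nat) : Int) := by omega
  have e4 : c = ((c.toNat : Nat) : Int) := by omega
  have hlen : pr.toNat < g.length := by omega
  unfold pvCell pvSet
  rw [e1, e2, e3, e4, PySem.List.pyGetD_pySetD_natCast g pr.toNat r.toNat _ _ hlen]
  by_cases h : r.toNat = pr.toNat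
  · rw [if_pos h]
    have hlenc : pc.toNat < (PySem.List.pyGetD g ((pr.toNat : Nat) : Int) []).length := by
      rw [← e1]; omega
    rw [PySem.List.pyGetD_pySetD_natCast _ pc.toNat c.toNat _ _ hlenc]
    by_cases h2 : c.toNat = pc.toNat
    · rw [if_pos h2, if_pos ⟨by exact_mod_cast h.symm, by exact_mod_cast h2.symm⟩]
    · rw [if_neg h2, if_neg (by simp; intro _; omega)]
      rw [h]
  · rw [if_neg h, if_neg (by simp; intro hh; omega)]

theorem checkA_set_eq_walk_some (g : List (List String)) (pr pc : Int)
    (hr0 : 0 ≤ pr) (hr : pr < (g.length : Int))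
    (hc0 : 0 ≤ pc) (hc : pc < ((PySem.List.pyGetD g pr []).length : Int)) :
    ∀ fuel r c dr dc vis,
      pvCheckA (pvSet g pr pc) fuel r c dr dc vis = (pvWalkB g (some (pr, pc)) fuel r c dr dc vis).1 := by
  intro fuel
  induction fuel with
  | zero => intro r c dr dc vis; rfl
  | succ n ih =>
    intro r c dr dc vis
    simp only [pvCheckA, pvWalkB, pvValid_pvSet g pr pc hr0 hr]
    split
    · rfl
    · split
      · rfl
      · next hval =>
        have hv : pvValid g (r + dr) (c + dc) = true := by
          revert hval; cases pvValid g (r + dr) (c + dc) <;> simp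
        have h0 : 0 ≤ r + dr ∧ 0 ≤ c + dc := by
          unfold pvValid at hv
          simp only [Bool.and_eq_true, decide_eq_true_eq] at hv
          exact ⟨hv.1.1.1, hv.1.2⟩
        rw [pvCell_pvSet g pr pc hr0 hr hc0 hc _ _ h0.1 h0.2]
        simp only [Option.some.injEq, Prod.mk.injEq]
        by_cases hp : pr = r + dr ∧ pc = c + dc
        · rw [if_pos hp, if_pos rfl]
          exact ih ..
        · rw [if_neg hp]
          split
          · exact ih ..
          · exact ih ..

theorem mem_pvPos_of_mem (vis : PySem.Set (Int × Int × Int × Int)) (s : Int × Int × Int × Int)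
    (h : s ∈ vis) : (s.1, s.2.1) ∈ pvPos vis := by
  simp only [pvPos, PySem.Set.mem_ofList, List.mem_map]
  exact ⟨s, h, rfl⟩

theorem pos_subset_walk (g : List (List String)) :
    ∀ fuel r c dr dc vis q, q ∈ pvPos vis → q ∈ (pvWalkB g none fuel r c dr dc vis).2 := by
  intro fuel
  have mono : ∀ (vis : PySem.Set (Int × Int × Int × Int)) s q,
      q ∈ pvPos vis → q ∈ pvPos (PySem.Set.add vis s) := by
    intro vis s q hq
    simp only [pvPos, PySem.Set.mem_ofList, List.mem_map] at *
    obtain ⟨x, hx, rfl⟩ := hq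
    exact ⟨x, (PySem.Set.mem_add _ _ _).2 (Or.inl hx), rfl⟩
  induction fuel with
  | zero => intro r c dr dc vis q hq; exact hq
  | succ n ih =>
    intro r c dr dc vis q hq
    simp only [pvWalkB, reduceCtorEq, if_false]
    split
    · exact hq
    · split
      · exact mono _ _ _ hq
      · split
        · exact ih _ _ _ _ _ _ (mono _ _ _ hq)
        · exact ih _ _ _ _ _ _ (mono _ _ _ hq)

theorem mem_walk_state (g : List (List String)) :
    ∀ fuel r c dr dc vis, (r, c) ∈ (pvWalkB g none (fuel + 1) r c dr dc vis).2 := by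
  intro fuel r c dr dc vis
  simp only [pvWalkB, reduceCtorEq, if_false]
  split
  · next h =>
    exact mem_pvPos_of_mem _ (r, c, dr, dc) ((PySem.Set.contains_iff _ _).1 h)
  · have hmem : ((r, c, dr, dc) : Int × Int × Int × Int) ∈ PySem.Set.add vis (r, c, dr, dc) :=
      (PySem.Set.mem_add _ _ _).2 (Or.inr rfl)
    have hpos := mem_pvPos_of_mem _ (r, c, dr, dc) hmem
    split
    · exact hpos
    · split
      · exact pos_subset_walk g fuel r c _ _ _ _ hpos
      · exact pos_subset_walk g fuel _ _ _ _ _ _ hpos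

theorem walk_off_path (g : List (List String)) (pr pc : Int) (hdot : pvCell g pr pc = ".") :
    ∀ fuel r c dr dc vis, (pr, pc) ∉ (pvWalkB g none fuel r c dr dc vis).2 →
      pvWalkB g (some (pr, pc)) fuel r c dr dc vis = pvWalkB g none fuel r c dr dc vis := by
  intro fuel
  induction fuel with
  | zero => intro r c dr dc vis _; rfl
  | succ n ih =>
    intro r c dr dc vis hnot
    simp only [pvWalkB, reduceCtorEq, if_false, Option.some.injEq, Prod.mk.injEq] at hnot ⊢
    by_cases h1 : vis.contains (r, c, dr, dc) = true
    · rw [if_pos h1, if_pos h1]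
    · rw [if_neg h1, if_neg h1]
      rw [if_neg h1] at hnot
      cases hb : pvValid g (r + dr) (c + dc) with
      | false =>
        have hv : ((!false) = true) := by decide
        rw [if_pos hv, if_pos hv]
      | true =>
        have hv : ¬((!true) = true) := by decide
        rw [if_neg hv, if_neg hv]
        rw [hb] at hnot
        rw [if_neg hv] at hnot
        by_cases h3 : pr = r + dr ∧ pc = c + dc
        · obtain ⟨h3a, h3b⟩ := h3
          rw [show (if pr = r + dr ∧ pc = c + dc then "#" else pvCell g (r + dr) (c + dc)) = "#" from if_pos ⟨h3a, h3b⟩]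
          rw [if_pos (rfl : ("#" : String) = "#")]
          rw [← h3a, ← h3b] at hnot ⊢
          rw [if_neg (show ¬(pvCell g pr pc = "#") by rw [hdot]; decide)] at hnot ⊢
          cases n with
          | zero => rfl
          | succ m => exact absurd (mem_walk_state g m pr pc dr dc _) hnot
        · rw [if_neg h3]
          split
          · next h => exact ih _ _ _ _ _ (by rw [if_pos h] at hnot; exact hnot)
          · next h => exact ih _ _ _ _ _ (by rw [if_neg h] at hnot; exact hnot)


-- abbreviations for the proofs: the unobstructed walk, the obstructed cycle answer,
-- and the per-cell contribution to the count
def pvRes (grid : List (List String)) (row col : Int) : Bool × PySem.Set (Int × Int) :=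
  pvWalkB grid none (pvFuel grid) row col (-1) 0 PySem.Set.empty

def pvWres (grid : List (List String)) (row col : Int) (p : Int × Int) : Bool :=
  (pvWalkB grid (some p) (pvFuel grid) row col (-1) 0 PySem.Set.empty).1

def pvContrib (grid : List (List String)) (row col : Int) (p : Int × Int) : Int :=
  if (0 ≤ p.1 ∧ p.1 < (grid.length : Int) ∧ 0 ≤ p.2 ∧
        p.2 < ((PySem.List.pyGetD grid 0 []).length : Int)) ∧
      pvCell grid p.1 p.2 = "." ∧ p ∈ (pvRes grid row col).2 then
    (if pvWres grid row col p then 1 else 0)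
  else 0

theorem walk_none_nodup (g : List (List String)) :
    ∀ fuel r c dr dc vis, ((pvWalkB g none fuel r c dr dc vis).2).Nodup := by
  intro fuel
  induction fuel with
  | zero => intro r c dr dc vis; exact PySem.Set.nodup_ofList _
  | succ n ih =>
    intro r c dr dc vis
    simp only [pvWalkB, reduceCtorEq, if_false]
    split
    · exact PySem.Set.nodup_ofList _
    · split
      · exact PySem.Set.nodup_ofList _
      · split
        · exact ih _ _ _ _ _
        · exact ih _ _ _ _ _

-- per-cell value of A's loop body, for an in-range "." cell, when the walk does not cycle
theorem cellA_eq_contrib (grid : List (List String)) (row col : Int)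
    (hpre : Pre_trap_patrol grid row col) (hcyc : (pvRes grid row col).1 = false)
    (r c : Int) (hrmem : r ∈ PySem.List.pyRange 0 (grid.length : Int) 1)
    (hcmem : c ∈ PySem.List.pyRange 0 ((PySem.List.pyGetD grid 0 []).length : Int) 1)
    (acc : Int) :
    (if pvCell grid r c ≠ "." then acc
     else if pvCheckA (pvSet grid r c) (pvFuel grid) row col (-1) 0 PySem.Set.empty then acc + 1
     else acc) = acc + pvContrib grid row col (r, c) := by
  unfold Pre_trap_patrol at hpre
  have hr := (PySem.List.mem_pyRange_one).1 hrmem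
  have hc := (PySem.List.mem_pyRange_one).1 hcmem
  by_cases hdot : pvCell grid r c = "."
  · rw [if_neg (not_not_intro hdot)]
    have hrow : PySem.List.pyGetD grid r [] ∈ grid :=
      PySem.List.pyGetD_mem grid [] (by constructor <;> omega)
    have hclen : c < ((PySem.List.pyGetD grid r []).length : Int) := by
      have := (hpre.resolve_left (by omega)) _ hrow
      omega
    rw [checkA_set_eq_walk_some grid r c hr.1 hr.2 hc.1 hclen]
    by_cases hin : (r, c) ∈ (pvRes grid row col).2
    · rw [show pvContrib grid row col (r, c) =
          (if pvWres grid row col (r, c) then 1 else 0) from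
        if_pos ⟨⟨hr.1, hr.2, hc.1, hc.2⟩, hdot, hin⟩]
      unfold pvWres
      split <;> omega
    · have hsame := walk_off_path grid r c hdot (pvFuel grid) row col (-1) 0 PySem.Set.empty hin
      rw [show pvContrib grid row col (r, c) = 0 from if_neg (by intro h; exact hin h.2.2)]
      unfold pvRes at hsame hcyc
      rw [hsame, hcyc]
      simp
  · rw [if_pos hdot, show pvContrib grid row col (r, c) = 0 from
      if_neg (by intro h; exact hdot h.2.1)]
    omega

-- A's double loop as a sum of contributions over the scanned rectangle (non-cycling case)
theorem a_sum (grid : List (List String)) (row col : Int)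
    (hpre : Pre_trap_patrol grid row col) (hcyc : (pvRes grid row col).1 = false) :
    trap_patrol grid row col =
      (((PySem.List.pyRange 0 (grid.length : Int) 1) ×ˢ
        (PySem.List.pyRange 0 ((PySem.List.pyGetD grid 0 []).length : Int) 1)).map
          (pvContrib grid row col)).sum := by
  unfold trap_patrol
  have step1 :
      (PySem.List.pyRange 0 (grid.length : Int) 1).foldl (fun cycles r =>
        (PySem.List.pyRange 0 ((PySem.List.pyGetD grid 0 []).length : Int) 1).foldl (fun cycles c =>
          if pvCell grid r c ≠ "." then cycles
          else if pvCheckA (pvSet grid r c) (pvFuel grid) row col (-1) 0 PySem.Set.empty then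
            cycles + 1
          else cycles) cycles) 0 =
      (PySem.List.pyRange 0 (grid.length : Int) 1).foldl (fun cycles r =>
        cycles + ((PySem.List.pyRange 0 ((PySem.List.pyGetD grid 0 []).length : Int) 1).map
          (fun c => pvContrib grid row col (r, c))).sum) 0 := by
    apply PySem.List.foldl_congr_mem'
    intro r hrmem acc
    rw [PySem.List.foldl_congr_mem' _ _ _ _
      (fun c hcmem acc' => cellA_eq_contrib grid row col hpre hcyc r c hrmem hcmem acc')]
    exact PySem.List.foldl_add _ _ _
  rw [step1, PySem.List.foldl_add]
  have prod_sum :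
      ∀ (l1 l2 : List Int) (f : Int × Int → Int),
        ((l1 ×ˢ l2).map f).sum = (l1.map (fun a => ((l2.map (fun b => f (a, b)))).sum)).sum := by
    intro l1 l2 f
    induction l1 with
    | nil => rfl
    | cons x xs ih => simp [List.product_cons, ih, Function.comp_def]
  rw [prod_sum]
  simp

-- B's path loop as a sum of the same contributions over the path (non-cycling case)
theorem b_sum (grid : List (List String)) (row col : Int)
    (hcyc : (pvRes grid row col).1 = false) :
    trap_patrol_alt grid row col = (((pvRes grid row col).2).map (pvContrib grid row col)).sum := by
  simp only [trap_patrol_alt]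
  rw [show (pvWalkB grid none (pvFuel grid) row col (-1) 0 PySem.Set.empty) = pvRes grid row col
    from rfl]
  rw [hcyc]
  simp only [Bool.false_eq_true, if_false]
  rw [PySem.List.foldl_congr_mem' _ _ _ _ (fun p hp acc => by
    show _ = acc + pvContrib grid row col p
    unfold pvContrib
    by_cases hg : (0 ≤ p.1 ∧ p.1 < (grid.length : Int) ∧ 0 ≤ p.2 ∧
        p.2 < ((PySem.List.pyGetD grid 0 []).length : Int) ∧ pvCell grid p.1 p.2 = ".")
    · have hbig : (0 ≤ p.1 ∧ p.1 < (grid.length : Int) ∧ 0 ≤ p.2 ∧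
          p.2 < ((PySem.List.pyGetD grid 0 []).length : Int)) ∧
          pvCell grid p.1 p.2 = "." ∧ p ∈ (pvRes grid row col).2 :=
        ⟨⟨hg.1, hg.2.1, hg.2.2.1, hg.2.2.2.1⟩, hg.2.2.2.2, hp⟩
      rw [if_pos hg, if_pos hbig]
      unfold pvWres
      split <;> omega
    · rw [if_neg hg, if_neg (by
        intro h
        exact hg ⟨h.1.1, h.1.2.1, h.1.2.2.1, h.1.2.2.2, h.2.1⟩)]
      omega)]
  rw [PySem.List.foldl_add]
  simp

-- the two sums agree: a nonzero contribution forces its cell into both index lists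
theorem sums_agree (grid : List (List String)) (row col : Int) :
    (((PySem.List.pyRange 0 (grid.length : Int) 1) ×ˢ
      (PySem.List.pyRange 0 ((PySem.List.pyGetD grid 0 []).length : Int) 1)).map
        (pvContrib grid row col)).sum =
    (((pvRes grid row col).2).map (pvContrib grid row col)).sum := by
  set rect := (PySem.List.pyRange 0 (grid.length : Int) 1) ×ˢ
      (PySem.List.pyRange 0 ((PySem.List.pyGetD grid 0 []).length : Int) 1) with hrect
  set path := ((pvRes grid row col).2) with hpath
  have hnr : rect.Nodup :=
    (PySem.List.nodup_pyRange_one _ _).product (PySem.List.nodup_pyRange_one _ _)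
  have hnp : path.Nodup := walk_none_nodup grid _ _ _ _ _ _
  have hzero : ∀ p, pvContrib grid row col p ≠ 0 → p ∈ rect ∧ p ∈ path := by
    intro p hne
    unfold pvContrib at hne
    split at hne
    · next h =>
      refine ⟨?_, h.2.2⟩
      rw [hrect]
      have hp2 : (p.1, p.2) ∈ (PySem.List.pyRange 0 (grid.length : Int) 1).product
          (PySem.List.pyRange 0 ((PySem.List.pyGetD grid 0 []).length : Int) 1) :=
        (List.pair_mem_product).2 ⟨(PySem.List.mem_pyRange_one).2 ⟨h.1.1, h.1.2.1⟩,
          (PySem.List.mem_pyRange_one).2 ⟨h.1.2.2.1, h.1.2.2.2⟩⟩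
      exact hp2
    · exact absurd rfl hne
  rw [← List.sum_toFinset _ hnr, ← List.sum_toFinset _ hnp]
  have h1 : rect.toFinset.sum (pvContrib grid row col) =
      (rect.toFinset ∪ path.toFinset).sum (pvContrib grid row col) := by
    apply Finset.sum_subset Finset.subset_union_left
    intro x _ hx
    by_contra hne
    exact hx (List.mem_toFinset.2 (hzero x hne).1)
  have h2 : path.toFinset.sum (pvContrib grid row col) =
      (rect.toFinset ∪ path.toFinset).sum (pvContrib grid row col) := by
    apply Finset.sum_subset Finset.subset_union_right
    intro x _ hx
    by_contra hne
    exact hx (List.mem_toFinset.2 (hzero x hne).2)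
  rw [h1, h2]

-- the cycling case: both sides run the same double loop cell by cell
theorem main_eq_cycle (grid : List (List String)) (row col : Int)
    (hpre : Pre_trap_patrol grid row col) (hcyc : (pvRes grid row col).1 = true) :
    trap_patrol grid row col = trap_patrol_alt grid row col := by
  unfold Pre_trap_patrol at hpre
  unfold trap_patrol
  simp only [trap_patrol_alt]
  rw [show (pvWalkB grid none (pvFuel grid) row col (-1) 0 PySem.Set.empty) = pvRes grid row col
    from rfl]
  rw [hcyc]
  simp only [if_true]
  apply PySem.List.foldl_congr_mem'
  intro r hrmem acc
  apply PySem.List.foldl_congr_mem'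
  intro c hcmem acc'
  have hr := (PySem.List.mem_pyRange_one).1 hrmem
  have hc := (PySem.List.mem_pyRange_one).1 hcmem
  by_cases hdot : pvCell grid r c = "."
  · rw [if_neg (not_not_intro hdot), if_neg (not_not_intro hdot)]
    have hrow : PySem.List.pyGetD grid r [] ∈ grid :=
      PySem.List.pyGetD_mem grid [] (by constructor <;> omega)
    have hclen : c < ((PySem.List.pyGetD grid r []).length : Int) := by
      have := (hpre.resolve_left (by omega)) _ hrow
      omega
    rw [checkA_set_eq_walk_some grid r c hr.1 hr.2 hc.1 hclen]
    by_cases hin : PySem.Set.contains (pvRes grid row col).2 (r, c) = true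
    · rw [if_pos hin]
    · rw [if_neg hin]
      have hoff : (r, c) ∉ (pvRes grid row col).2 := by
        intro hmem
        exact hin ((PySem.Set.contains_iff _ _).2 hmem)
      unfold pvRes at hoff
      rw [walk_off_path grid r c hdot _ _ _ _ _ _ hoff]
      rw [show (pvWalkB grid none (pvFuel grid) row col (-1) 0 PySem.Set.empty) = pvRes grid row col
        from rfl]
      rw [hcyc]
      simp
  · rw [if_pos hdot, if_pos hdot]

theorem main_eq (grid : List (List String)) (row col : Int)
    (hpre : Pre_trap_patrol grid row col) :
    trap_patrol grid row col = trap_patrol_alt grid row col := by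
  cases hcyc : (pvRes grid row col).1 with
  | true => exact main_eq_cycle grid row col hpre hcyc
  | false => rw [a_sum grid row col hpre hcyc, b_sum grid row col hcyc, sums_agree]

-- ===== VERDICT (by name: the statement is the Claim_ definition above) =====
theorem trap_patrol_spec : Claim_equal_trap_patrol := by
  intro grid row col _hdom hpre
  unfold Spec_trap_patrol
  exact main_eq grid row col hpre
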